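-- pv_equiv track=rewrite | github.com/AGAMPANDEYY/zomato_nugget | app/api/app.py | generate_restaurant_response
-- ===== SOURCE A (Python) =====
-- RESTAURANT_DATA = {
--     "Happy Burger": {
--         "location": "123 Main St",
--         "cuisine": "American",
--         "price_range": "$$ (10-25)",
--         "vegetarian": "Limited options",
--         "vegan": "Few options",
--         "gluten_free": "Available for some items",
--         "menu": {
--             "appetizers": [
--                 {"name": "Cheese Sticks", "price": "$7.99", "vegetarian": True, "gluten_free": False},
--                 {"name": "Nachos", "price": "$9.99", "vegetarian": True, "gluten_free": True, "spice_level": "Medium"},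
--                 {"name": "Wings", "price": "$10.99", "vegetarian": False, "gluten_free": True, "spice_level": "Hot"}
--             ],
--             "mains": [
--                 {"name": "Classic Burger", "price": "$12.99", "vegetarian": False, "gluten_free": False},
--                 {"name": "Veggie Burger", "price": "$11.99", "vegetarian": True, "gluten_free": False},
--                 {"name": "Beyond Meat Burger", "price": "$14.99", "vegetarian": True, "vegan": True, "gluten_free": False}
--             ],
--             "desserts": [
--                 {"name": "Ice Cream", "price": "$5.99", "vegetarian": True, "gluten_free": True},
--                 {"name": "Chocolate Cake", "price": "$6.99", "vegetarian": True, "gluten_free": False}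
--             ]
--         }
--     },
--     "Spice Garden": {
--         "location": "456 Elm St",
--         "cuisine": "Indian",
--         "price_range": "$$ (15-30)",
--         "vegetarian": "Extensive options",
--         "vegan": "Many options",
--         "gluten_free": "Most dishes are gluten-free",
--         "menu": {
--             "appetizers": [
--                 {"name": "Samosas", "price": "$6.99", "vegetarian": True, "gluten_free": False, "spice_level": "Mild"},
--                 {"name": "Pakoras", "price": "$7.99", "vegetarian": True, "vegan": True, "gluten_free": True, "spice_level": "Mild"}
--             ],
--             "mains": [
--                 {"name": "Butter Chicken", "price": "$16.99", "vegetarian": False, "gluten_free": True, "spice_level": "Medium"},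
--                 {"name": "Chana Masala", "price": "$14.99", "vegetarian": True, "vegan": True, "gluten_free": True, "spice_level": "Medium"},
--                 {"name": "Lamb Vindaloo", "price": "$18.99", "vegetarian": False, "gluten_free": True, "spice_level": "Very Hot"}
--             ],
--             "desserts": [
--                 {"name": "Gulab Jamun", "price": "$5.99", "vegetarian": True, "gluten_free": False},
--                 {"name": "Kheer", "price": "$4.99", "vegetarian": True, "gluten_free": True}
--             ]
--         }
--     },
--     "Tandoor Palace": {
--         "location": "789 Oak St",
--         "cuisine": "Indian",
--         "price_range": "$$$ (20-40)",
--         "vegetarian": "Many options",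
--         "vegan": "Several options",
--         "gluten_free": "Most dishes available",
--         "menu": {
--             "appetizers": [
--                 {"name": "Vegetable Samosas", "price": "$7.99", "vegetarian": True, "vegan": True, "gluten_free": False, "spice_level": "Mild"},
--                 {"name": "Chicken Tikka", "price": "$10.99", "vegetarian": False, "gluten_free": True, "spice_level": "Medium"}
--             ],
--             "mains": [
--                 {"name": "Chicken Tikka Masala", "price": "$17.99", "vegetarian": False, "gluten_free": True, "spice_level": "Medium"},
--                 {"name": "Palak Paneer", "price": "$15.99", "vegetarian": True, "gluten_free": True, "spice_level": "Mild"},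
--                 {"name": "Lamb Rogan Josh", "price": "$19.99", "vegetarian": False, "gluten_free": True, "spice_level": "Hot"}
--             ],
--             "desserts": [
--                 {"name": "Ras Malai", "price": "$6.99", "vegetarian": True, "gluten_free": True},
--                 {"name": "Kulfi", "price": "$5.99", "vegetarian": True, "gluten_free": True}
--             ]
--         }
--     }
-- }
--
-- def generate_restaurant_response(query: str) -> str:
--     query = query.lower()
--     if "vegetarian" in query:
--         if "best" in query or "most" in query:
--             return "Spice Garden has the most extensive vegetarian options among our restaurants. They offer many dishes like Chana Masala and Palak Paneer that are fully vegetarian."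
--         for name, data in RESTAURANT_DATA.items():
--             if name.lower() in query:
--                 return f"{name} offers {data['vegetarian']} vegetarian options on their menu."
--     if "gluten" in query:
--         for name, data in RESTAURANT_DATA.items():
--             if name.lower() in query:
--                 return f"{name} {data['gluten_free']} on their menu."
--     if "price" in query or "expensive" in query or "cost" in query:
--         for name, data in RESTAURANT_DATA.items():
--             if name.lower() in query:
--                 return f"{name}'s price range is {data['price_range']}."
--     if "spice" in query and "compare" in query and "tandoor palace" in query and "spice garden" in query:
--         return "Both restaurants offer similar spice levels. Spice Garden's Lamb Vindaloo is rated 'Very Hot', while Tandoor Palace's Lamb Rogan Josh is rated 'Hot'."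
--     return "I can help with restaurant info. Please ask about Happy Burger, Spice Garden, or Tandoor Palace."
-- ===== SOURCE B (Python) =====
-- # Data-driven rewrite: one rule table interpreted by a single generic loop,
-- # instead of A's hard-coded branch cascade with per-branch restaurant loops.
--
-- RESTAURANT_INFO = [
--     ("Happy Burger", "Limited options", "Available for some items", "$$ (10-25)"),
--     ("Spice Garden", "Extensive options", "Most dishes are gluten-free", "$$ (15-30)"),
--     ("Tandoor Palace", "Many options", "Most dishes available", "$$$ (20-40)"),
-- ]
--
-- BEST_VEG = "Spice Garden has the most extensive vegetarian options among our restaurants. They offer many dishes like Chana Masala and Palak Paneer that are fully vegetarian."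
-- SPICE_CMP = "Both restaurants offer similar spice levels. Spice Garden's Lamb Vindaloo is rated 'Very Hot', while Tandoor Palace's Lamb Rogan Josh is rated 'Hot'."
-- DEFAULT = "I can help with restaurant info. Please ask about Happy Burger, Spice Garden, or Tandoor Palace."
--
-- # Each rule: (trigger in disjunctive normal form over required substrings of the
-- # lowered query, action taking the first matched restaurant row or None).
-- # An action returning None means "this rule does not apply here, keep going".
-- RULES = [
--     ([["vegetarian", "best"], ["vegetarian", "most"]], lambda m: BEST_VEG),
--     ([["vegetarian"]], lambda m: m and f"{m[0]} offers {m[1]} vegetarian options on their menu."),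
--     ([["gluten"]], lambda m: m and f"{m[0]} {m[2]} on their menu."),
--     ([["price"], ["expensive"], ["cost"]], lambda m: m and f"{m[0]}'s price range is {m[3]}."),
--     ([["spice", "compare", "tandoor palace", "spice garden"]], lambda m: SPICE_CMP),
-- ]
--
--
-- def generate_restaurant_response(query: str) -> str:
--     q = query.lower()
--     matched = next((row for row in RESTAURANT_INFO if row[0].lower() in q), None)
--     for dnf, action in RULES:
--         if any(all(kw in q for kw in conj) for conj in dnf):
--             result = action(matched)
--             if result is not None:
--                 return result
--     return DEFAULT
-- ===== Notes on version B (the rewrite author's own statement) =====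
-- stated objective: alternative
-- what changed: A's hard-coded if/elif cascade with a separate restaurant loop inside each branch is replaced by a declarative rule table (DNF keyword triggers paired with actions) interpreted by one generic loop, with the restaurant match computed once and fed to the actions.
import Mathlib
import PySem

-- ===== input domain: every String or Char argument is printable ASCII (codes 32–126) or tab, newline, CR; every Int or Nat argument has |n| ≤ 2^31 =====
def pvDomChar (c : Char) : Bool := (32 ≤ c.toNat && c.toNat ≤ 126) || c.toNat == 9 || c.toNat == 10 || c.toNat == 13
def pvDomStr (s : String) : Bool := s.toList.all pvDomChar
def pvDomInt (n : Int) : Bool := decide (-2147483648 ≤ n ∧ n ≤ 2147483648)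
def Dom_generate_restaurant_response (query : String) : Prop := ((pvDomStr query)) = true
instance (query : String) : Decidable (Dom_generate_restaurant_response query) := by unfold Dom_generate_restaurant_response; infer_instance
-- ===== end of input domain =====

-- B replaces A's hard-coded branch cascade (with a restaurant loop per branch) by one
-- generic interpreter over a declarative rule table; return value only, no side effects.

-- ===== PORT A =====
-- The fields of RESTAURANT_DATA that generate_restaurant_response reads: (name, vegetarian, gluten_free, price_range).
def pvRestaurantData : List (String × String × String × String) :=
  [("Happy Burger", "Limited options", "Available for some items", "$$ (10-25)"),
   ("Spice Garden", "Extensive options", "Most dishes are gluten-free", "$$ (15-30)"),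
   ("Tandoor Palace", "Many options", "Most dishes available", "$$$ (20-40)")]

-- the loop in the "vegetarian" branch (early return = first some)
def pvLoopVeg (q : String) : List (String × String × String × String) → Option String
  | [] => none
  | (name, veg, _, _) :: rest =>
      if PySem.Str.isIn (PySem.Str.lower name) q then
        some (name ++ " offers " ++ veg ++ " vegetarian options on their menu.")
      else pvLoopVeg q rest

-- the loop in the "gluten" branch
def pvLoopGluten (q : String) : List (String × String × String × String) → Option String
  | [] => none
  | (name, _, gf, _) :: rest =>
      if PySem.Str.isIn (PySem.Str.lower name) q then
        some (name ++ " " ++ gf ++ " on their menu.")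
      else pvLoopGluten q rest

-- the loop in the "price" branch
def pvLoopPrice (q : String) : List (String × String × String × String) → Option String
  | [] => none
  | (name, _, _, pr) :: rest =>
      if PySem.Str.isIn (PySem.Str.lower name) q then
        some (name ++ "'s price range is " ++ pr ++ ".")
      else pvLoopPrice q rest

def generate_restaurant_response (query : String) : String :=
  let q := PySem.Str.lower query
  match (if PySem.Str.isIn "vegetarian" q then
           (if PySem.Str.isIn "best" q || PySem.Str.isIn "most" q then
              some "Spice Garden has the most extensive vegetarian options among our restaurants. They offer many dishes like Chana Masala and Palak Paneer that are fully vegetarian."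
            else pvLoopVeg q pvRestaurantData)
         else none) with
  | some r => r
  | none =>
  match (if PySem.Str.isIn "gluten" q then pvLoopGluten q pvRestaurantData else none) with
  | some r => r
  | none =>
  match (if PySem.Str.isIn "price" q || PySem.Str.isIn "expensive" q || PySem.Str.isIn "cost" q then
           pvLoopPrice q pvRestaurantData
         else none) with
  | some r => r
  | none =>
  if PySem.Str.isIn "spice" q && PySem.Str.isIn "compare" q && PySem.Str.isIn "tandoor palace" q && PySem.Str.isIn "spice garden" q then
    "Both restaurants offer similar spice levels. Spice Garden's Lamb Vindaloo is rated 'Very Hot', while Tandoor Palace's Lamb Rogan Josh is rated 'Hot'."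
  else
    "I can help with restaurant info. Please ask about Happy Burger, Spice Garden, or Tandoor Palace."

-- ===== PORT B =====
def pvRestaurantInfo : List (String × String × String × String) :=
  [("Happy Burger", "Limited options", "Available for some items", "$$ (10-25)"),
   ("Spice Garden", "Extensive options", "Most dishes are gluten-free", "$$ (15-30)"),
   ("Tandoor Palace", "Many options", "Most dishes available", "$$$ (20-40)")]

def pvBestVeg : String := "Spice Garden has the most extensive vegetarian options among our restaurants. They offer many dishes like Chana Masala and Palak Paneer that are fully vegetarian."
def pvSpiceCmp : String := "Both restaurants offer similar spice levels. Spice Garden's Lamb Vindaloo is rated 'Very Hot', while Tandoor Palace's Lamb Rogan Josh is rated 'Hot'."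
def pvDefaultMsg : String := "I can help with restaurant info. Please ask about Happy Burger, Spice Garden, or Tandoor Palace."

-- the rule table: trigger in DNF over substrings of the lowered query × action on the matched row
def pvRules : List (List (List String) × (Option (String × String × String × String) → Option String)) :=
  [([["vegetarian", "best"], ["vegetarian", "most"]], fun _ => some pvBestVeg),
   ([["vegetarian"]], fun m => m.map (fun r => r.1 ++ " offers " ++ r.2.1 ++ " vegetarian options on their menu.")),
   ([["gluten"]], fun m => m.map (fun r => r.1 ++ " " ++ r.2.2.1 ++ " on their menu.")),
   ([["price"], ["expensive"], ["cost"]], fun m => m.map (fun r => r.1 ++ "'s price range is " ++ r.2.2.2 ++ ".")),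
   ([["spice", "compare", "tandoor palace", "spice garden"]], fun _ => some pvSpiceCmp)]

-- port of next((row for row in RESTAURANT_INFO if row[0].lower() in q), None)
def pvMatch (q : String) : List (String × String × String × String) → Option (String × String × String × String)
  | [] => none
  | row :: rest => if PySem.Str.isIn (PySem.Str.lower row.1) q then some row else pvMatch q rest

-- the generic rule loop: first rule whose trigger fires and whose action applies
def pvRunRules (q : String) (m : Option (String × String × String × String)) :
    List (List (List String) × (Option (String × String × String × String) → Option String)) → String
  | [] => pvDefaultMsg
  | (dnf, action) :: rest =>
      if dnf.any (fun conj => conj.all (fun kw => PySem.Str.isIn kw q)) then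
        match action m with
        | some r => r
        | none => pvRunRules q m rest
      else pvRunRules q m rest

def generate_restaurant_response_alt (query : String) : String :=
  let q := PySem.Str.lower query
  pvRunRules q (pvMatch q pvRestaurantInfo) pvRules

-- ===== PRECONDITION & SPEC =====
def Spec_generate_restaurant_response (query : String) (out : String) : Prop := out = generate_restaurant_response_alt query
instance (query : String) (out : String) : Decidable (Spec_generate_restaurant_response query out) := by unfold Spec_generate_restaurant_response; infer_instance

-- ===== CLAIM (what is proved, stated in full; the proofs are below) =====
def Claim_equal_generate_restaurant_response : Prop := ∀ (query : String), Dom_generate_restaurant_response query → Spec_generate_restaurant_response query (generate_restaurant_response query)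

-- ===== LEMMAS AND PROOFS =====
-- each of A's per-branch loops is B's first-match scan followed by that branch's formatting
theorem pvLoopVeg_eq (q : String) (rows : List (String × String × String × String)) :
    pvLoopVeg q rows = (pvMatch q rows).map
      (fun r => r.1 ++ " offers " ++ r.2.1 ++ " vegetarian options on their menu.") := by
  induction rows with
  | nil => rfl
  | cons r rest ih =>
      obtain ⟨name, veg, gf, pr⟩ := r
      simp only [pvLoopVeg, pvMatch]
      split <;> simp [ih]

theorem pvLoopGluten_eq (q : String) (rows : List (String × String × String × String)) :
    pvLoopGluten q rows = (pvMatch q rows).map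
      (fun r => r.1 ++ " " ++ r.2.2.1 ++ " on their menu.") := by
  induction rows with
  | nil => rfl
  | cons r rest ih =>
      obtain ⟨name, veg, gf, pr⟩ := r
      simp only [pvLoopGluten, pvMatch]
      split <;> simp [ih]

theorem pvLoopPrice_eq (q : String) (rows : List (String × String × String × String)) :
    pvLoopPrice q rows = (pvMatch q rows).map
      (fun r => r.1 ++ "'s price range is " ++ r.2.2.2 ++ ".") := by
  induction rows with
  | nil => rfl
  | cons r rest ih =>
      obtain ⟨name, veg, gf, pr⟩ := r
      simp only [pvLoopPrice, pvMatch]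
      split <;> simp [ih]

-- ===== VERDICT (by name: the statement is the Claim_ definition above) =====
theorem generate_restaurant_response_spec : Claim_equal_generate_restaurant_response := by
  intro query _
  unfold Spec_generate_restaurant_response generate_restaurant_response generate_restaurant_response_alt
  simp only [pvLoopVeg_eq, pvLoopGluten_eq, pvLoopPrice_eq, pvRestaurantData, pvRestaurantInfo]
  set q := PySem.Str.lower query
  simp only [pvRules, pvRunRules, List.any_cons, List.any_nil, List.all_cons, List.all_nil,
    Bool.and_true, Bool.or_false]
  rcases hm : pvMatch q pvRestaurantInfo with _ | ⟨name, veg, gf, pr⟩ <;>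
    cases hveg : PySem.Str.isIn "vegetarian" q <;>
    cases hbm : PySem.Str.isIn "best" q || PySem.Str.isIn "most" q <;>
    cases hg : PySem.Str.isIn "gluten" q <;>
    cases hp : PySem.Str.isIn "price" q || PySem.Str.isIn "expensive" q || PySem.Str.isIn "cost" q <;>
    cases hs : PySem.Str.isIn "spice" q && PySem.Str.isIn "compare" q && PySem.Str.isIn "tandoor palace" q && PySem.Str.isIn "spice garden" q <;>
    simp_all [pvRestaurantInfo, pvBestVeg, pvSpiceCmp, pvDefaultMsg, Bool.or_assoc, Bool.and_assoc]
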